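-- pv_equiv track=rewrite | github.com/eliottcassidy2000/math | 04-computation/degree4_n9_investigation.py | classify_support
-- ===== SOURCE A (Python) =====
-- from collections import defaultdict
--
-- def classify_support(edge_list):
--     """Classify the support graph of a 4-edge monomial."""
--     verts = set()
--     deg = defaultdict(int)
--     for u, v in edge_list:
--         verts.add(u)
--         verts.add(v)
--         deg[u] += 1
--         deg[v] += 1
--     nv = len(verts)
--     deg_seq = tuple(sorted([deg[v] for v in verts], reverse=True))
--     return nv, deg_seq
-- ===== SOURCE B (Python) =====
-- def classify_support(edge_list):
--     """Classify the support graph of a 4-edge monomial."""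
--     ends = sorted(x for e in edge_list for x in e)
--     degs = []
--     if ends:
--         cur, cnt = ends[0], 1
--         for y in ends[1:]:
--             if y == cur:
--                 cnt += 1
--             else:
--                 degs.append(cnt)
--                 cur, cnt = y, 1
--         degs.append(cnt)
--     return len(degs), tuple(sorted(degs, reverse=True))
-- ===== Notes on version B (the rewrite author's own statement) =====
-- stated objective: alternative
-- what changed: Replaces the hash-based set/defaultdict counting loop with sort-then-run-length: all endpoints are flattened and sorted, each maximal run of equal values is one distinct vertex and its length is that vertex's degree, so no set or dict is maintained at all.
import Mathlib
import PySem

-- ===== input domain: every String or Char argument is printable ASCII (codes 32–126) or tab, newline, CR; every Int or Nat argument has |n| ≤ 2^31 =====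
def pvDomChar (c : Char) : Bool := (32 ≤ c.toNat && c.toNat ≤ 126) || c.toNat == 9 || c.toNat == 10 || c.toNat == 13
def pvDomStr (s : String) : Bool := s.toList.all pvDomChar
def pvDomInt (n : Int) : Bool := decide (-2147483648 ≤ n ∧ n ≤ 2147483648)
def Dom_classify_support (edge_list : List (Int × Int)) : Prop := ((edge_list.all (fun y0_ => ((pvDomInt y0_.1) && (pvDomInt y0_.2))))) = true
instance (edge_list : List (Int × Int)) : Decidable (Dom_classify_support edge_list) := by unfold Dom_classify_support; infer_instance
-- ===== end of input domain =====

-- ===== PORT A =====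
-- B sorts the flattened endpoints and reads each vertex's degree off as a run length; objective: alternative (no set/dict maintained).
-- A's for-loop over the edges, accumulating the vertex set and the degree dict
def pvLoopA (edge_list : List (Int × Int)) : PySem.Set Int × PySem.Dict Int Int :=
  edge_list.foldl
    (fun (st : PySem.Set Int × PySem.Dict Int Int) e =>
      (PySem.Set.add (PySem.Set.add st.1 e.1) e.2,
       (st.2.modify e.1 0 (· + 1)).modify e.2 0 (· + 1)))
    (PySem.Set.empty, PySem.Dict.empty)

def classify_support (edge_list : List (Int × Int)) : Int × List Int :=
  ((PySem.Set.len (pvLoopA edge_list).1 : Int),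
   PySem.List.sorted ((pvLoopA edge_list).1.map (fun v => (pvLoopA edge_list).2.getD v 0)) (fun x => x) true)

-- ===== PORT B =====
-- the run-length for-loop of Source B: cur is the current value, cnt its count so far
def pvRunsGo (cur cnt : Int) : List Int → List Int
  | [] => [cnt]
  | y :: ys => if y == cur then pvRunsGo cur (cnt + 1) ys else cnt :: pvRunsGo y 1 ys

def pvRuns (ys : List Int) : List Int :=
  match ys with
  | [] => []
  | x :: t => pvRunsGo x 1 t

def pvDegs (edge_list : List (Int × Int)) : List Int :=
  pvRuns (PySem.List.sorted (edge_list.flatMap (fun e => [e.1, e.2])) (fun x => x) false)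

def classify_support_alt (edge_list : List (Int × Int)) : Int × List Int :=
  (((pvDegs edge_list).length : Int),
   PySem.List.sorted (pvDegs edge_list) (fun x => x) true)

-- ===== PRECONDITION & SPEC =====
def Spec_classify_support (edge_list : List (Int × Int)) (out : Int × List Int) : Prop := out = classify_support_alt edge_list
instance (edge_list : List (Int × Int)) (out : Int × List Int) : Decidable (Spec_classify_support edge_list out) := by unfold Spec_classify_support; infer_instance

-- ===== CLAIM (what is proved, stated in full; the proofs are below) =====
def Claim_equal_classify_support : Prop := ∀ (edge_list : List (Int × Int)), Dom_classify_support edge_list → Spec_classify_support edge_list (classify_support edge_list)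

-- ===== LEMMAS AND PROOFS =====

-- proof-only restatement of pvRuns by whole runs (takeWhile/dropWhile)
def pvRunsSpec (ys : List Int) : List Int :=
  match ys with
  | [] => []
  | x :: t =>
      (((t.takeWhile (fun y => y == x)).length + 1 : Int)) ::
        pvRunsSpec (t.dropWhile (fun y => y == x))
termination_by ys.length
decreasing_by
  simp only [List.length_cons]
  have := List.length_dropWhile_le (fun y => y == x) t
  omega

-- the head of each run, in order (proof-only companion of pvRunsSpec)
def pvHeads (ys : List Int) : List Int :=
  match ys with
  | [] => []
  | x :: t => x :: pvHeads (t.dropWhile (fun y => y == x))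
termination_by ys.length
decreasing_by
  simp only [List.length_cons]
  have := List.length_dropWhile_le (fun y => y == x) t
  omega

-- the cur/cnt scan emits the current run's total length, then the runs of the remainder
theorem pv_go_eq (t : List Int) : ∀ (cur cnt : Int),
    pvRunsGo cur cnt t
      = (((t.takeWhile (fun y => y == cur)).length : Int) + cnt) ::
          pvRunsSpec (t.dropWhile (fun y => y == cur)) := by
  induction t with
  | nil => intro cur cnt; simp [pvRunsGo, pvRunsSpec]
  | cons y ys ih =>
      intro cur cnt
      by_cases h : (y == cur) = true
      · rw [pvRunsGo]
        simp only [List.takeWhile_cons, List.dropWhile_cons, h, if_pos]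
        rw [ih cur (cnt + 1)]
        congr 1
        simp only [List.length_cons]
        push_cast
        ring
      · rw [pvRunsGo]
        simp only [List.takeWhile_cons, List.dropWhile_cons, h]
        simp only [Bool.false_eq_true, if_false, List.length_nil]
        rw [ih y 1, pvRunsSpec]
        simp

theorem pv_runs_eq_spec (ys : List Int) : pvRuns ys = pvRunsSpec ys := by
  cases ys with
  | nil => simp [pvRuns, pvRunsSpec]
  | cons x t =>
      rw [pvRuns, pv_go_eq t x 1, pvRunsSpec]

-- The paired fold of A is the pair of folds over the flattened endpoint list.
theorem pv_fold_split (edge_list : List (Int × Int)) (s : PySem.Set Int) (d : PySem.Dict Int Int) :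
    edge_list.foldl
      (fun (st : PySem.Set Int × PySem.Dict Int Int) e =>
        (PySem.Set.add (PySem.Set.add st.1 e.1) e.2,
         (st.2.modify e.1 0 (· + 1)).modify e.2 0 (· + 1)))
      (s, d)
    = ((edge_list.flatMap (fun e => [e.1, e.2])).foldl PySem.Set.add s,
       (edge_list.flatMap (fun e => [e.1, e.2])).foldl (fun d x => d.modify x 0 (· + 1)) d) := by
  induction edge_list generalizing s d with
  | nil => rfl
  | cons e rest ih => simp [List.foldl_cons, ih]

-- Descending sorts (identity key) of permuted Int lists agree.
theorem pv_sorted_rev_perm (xs ys : List Int) (h : xs.Perm ys) :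
    PySem.List.sorted xs (fun x => x) true = PySem.List.sorted ys (fun x => x) true := by
  have hx := PySem.List.sorted_pairwise_rev (xs := xs) (key := fun x => x)
  have hy := PySem.List.sorted_pairwise_rev (xs := ys) (key := fun x => x)
  have hp : (PySem.List.sorted xs (fun x => x) true).Perm (PySem.List.sorted ys (fun x => x) true) :=
    ((PySem.List.sorted_perm xs (fun x => x) true).trans h).trans
      (PySem.List.sorted_perm ys (fun x => x) true).symm
  exact hp.eq_of_pairwise (le := fun a b : Int => b ≤ a)
    (fun a b _ _ h1 h2 => le_antisymm h2 h1) hx hy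

-- x does not occur after its own run in a ≤-sorted tail.
theorem pv_not_mem_dropWhile (x : Int) (t : List Int)
    (hall : ∀ y ∈ t, x ≤ y) (hp : t.Pairwise (· ≤ ·)) :
    x ∉ t.dropWhile (fun y => y == x) := by
  induction t with
  | nil => simp
  | cons y t' ih =>
      by_cases hy : (y == x) = true
      · rw [List.dropWhile_cons, if_pos hy]
        exact ih (fun z hz => hall z (List.mem_cons_of_mem _ hz)) hp.of_cons
      · rw [List.dropWhile_cons, if_neg hy]
        intro hmem
        rcases List.mem_cons.1 hmem with h | h
        · exact hy (by simp [h])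
        · have h1 : y ≤ x := (List.pairwise_cons.1 hp).1 x h
          have h2 : x ≤ y := hall y List.mem_cons_self
          exact hy (by simp [le_antisymm h1 h2])

-- Master lemma: on a ≤-sorted list, pvRunsSpec lists the multiplicity of each run head,
-- the heads are strictly increasing, and the heads are exactly the members.
theorem pv_runs_master (ys : List Int) (hp : ys.Pairwise (· ≤ ·)) :
    pvRunsSpec ys = (pvHeads ys).map (fun v => (ys.count v : Int)) ∧
    (pvHeads ys).Pairwise (· < ·) ∧
    (∀ v, v ∈ pvHeads ys ↔ v ∈ ys) := by
  induction ys using pvRunsSpec.induct with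
  | case1 => simp [pvRunsSpec, pvHeads]
  | case2 x t ih =>
      have hx : ∀ y ∈ t, x ≤ y := (List.pairwise_cons.1 hp).1
      have ht : t.Pairwise (· ≤ ·) := hp.of_cons
      set r := t.takeWhile (fun y => y == x) with hr
      set rest := t.dropWhile (fun y => y == x) with hrest
      have hsplit : r ++ rest = t := List.takeWhile_append_dropWhile
      have hrx : ∀ y ∈ r, y = x := by
        intro y hyr
        have := List.mem_takeWhile_imp hyr
        simpa using this
      have hxrest : x ∉ rest := pv_not_mem_dropWhile x t hx ht
      have hrestsub : ∀ y ∈ rest, y ∈ t := fun y hy => by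
        rw [← hsplit]; exact List.mem_append_right _ hy
      have hxlt : ∀ y ∈ rest, x < y := by
        intro y hy
        rcases lt_or_eq_of_le (hx y (hrestsub y hy)) with h | h
        · exact h
        · exact absurd (h ▸ hy) hxrest
      have hprest : rest.Pairwise (· ≤ ·) := List.Pairwise.sublist (List.dropWhile_sublist _) ht
      obtain ⟨ih1, ih2, ih3⟩ := ih hprest
      have hcx : (x :: t).count x = r.length + 1 := by
        have h1 : r.count x = r.length := List.count_eq_length.2 (fun b hb => by simp [hrx b hb])
        have h2 : rest.count x = 0 := List.count_eq_zero.2 hxrest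
        rw [List.count_cons_self, ← hsplit, List.count_append, h1, h2]
      have hcv : ∀ v ∈ pvHeads rest, (x :: t).count v = rest.count v := by
        intro v hv
        have hvrest : v ∈ rest := (ih3 v).1 hv
        have hvx : v ≠ x := fun h => hxrest (h ▸ hvrest)
        have hvr : r.count v = 0 := List.count_eq_zero.2 (fun hm => hvx (hrx v hm))
        rw [List.count_cons_of_ne (Ne.symm hvx), ← hsplit, List.count_append, hvr, Nat.zero_add]
      refine ⟨?_, ?_, ?_⟩
      · show pvRunsSpec (x :: t) = _
        rw [pvRunsSpec, pvHeads]
        simp only [← hr, ← hrest, List.map_cons, ih1]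
        congr 1
        · rw [hcx]; push_cast; ring
        · exact List.map_congr_left (fun v hv => by rw [hcv v hv])
      · rw [pvHeads]
        simp only [← hrest]
        exact List.pairwise_cons.2 ⟨fun v hv => hxlt v ((ih3 v).1 hv), ih2⟩
      · intro v
        rw [pvHeads]
        simp only [← hrest, List.mem_cons]
        constructor
        · rintro (h | h)
          · exact Or.inl h
          · exact Or.inr (hrestsub v ((ih3 v).1 h))
        · rintro (h | h)
          · exact Or.inl h
          · rw [← hsplit] at h
            rcases List.mem_append.1 h with h | h
            · exact Or.inl (hrx v h)
            · exact Or.inr ((ih3 v).2 h)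

theorem classify_support_eq_alt (edge_list : List (Int × Int)) :
    classify_support edge_list = classify_support_alt edge_list := by
  unfold classify_support classify_support_alt pvLoopA pvDegs
  rw [pv_fold_split]
  set flat := edge_list.flatMap (fun e => [e.1, e.2]) with hflat
  have hverts : flat.foldl PySem.Set.add PySem.Set.empty = PySem.Set.ofList flat := rfl
  have hdeg : flat.foldl (fun d x => d.modify x 0 (· + 1)) PySem.Dict.empty = PySem.Dict.counter flat :=
    (PySem.Dict.counter_eq_foldl flat).symm
  simp only [hverts, hdeg]
  set ys := PySem.List.sorted flat (fun x => x) false with hys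
  have hperm : ys.Perm flat := PySem.List.sorted_perm _ _ _
  have hsorted : ys.Pairwise (· ≤ ·) := PySem.List.sorted_pairwise (xs := flat) (key := fun x => x)
  obtain ⟨h1, h2, h3⟩ := pv_runs_master ys hsorted
  -- counts over ys equal counts over flat
  have hcount : (fun v => (ys.count v : Int)) = (fun v => (flat.count v : Int)) := by
    funext v; rw [hperm.count_eq]
  -- the run heads are a permutation of set(flat)
  have hheadsperm : (pvHeads ys).Perm (PySem.Set.ofList flat) := by
    rw [List.perm_ext_iff_of_nodup
      ((h2.imp (fun h => ne_of_lt h)) : List.Nodup _) (PySem.Set.nodup_ofList flat)]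
    intro v
    rw [h3 v, PySem.Set.mem_ofList, PySem.List.mem_sorted]
  have hrunsperm : (pvRuns ys).Perm ((PySem.Set.ofList flat).map (fun v => (flat.count v : Int))) := by
    rw [pv_runs_eq_spec, h1, hcount]
    exact hheadsperm.map _
  -- A's degree list as counts
  have hmap : (PySem.Set.ofList flat).map (fun v => (PySem.Dict.counter flat).getD v 0)
      = (PySem.Set.ofList flat).map (fun v => (flat.count v : Int)) := by
    exact List.map_congr_left (fun v _ => PySem.Dict.getD_counter (xs := flat) (v := v))
  refine Prod.ext ?_ ?_
  · show ((PySem.Set.len (PySem.Set.ofList flat) : Int)) = ((pvRuns ys).length : Int)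
    have := hrunsperm.length_eq
    simp only [PySem.Set.len, this, List.length_map]
  · show PySem.List.sorted ((PySem.Set.ofList flat).map fun v => (PySem.Dict.counter flat).getD v 0) (fun x => x) true
      = PySem.List.sorted (pvRuns ys) (fun x => x) true
    rw [hmap]
    exact (pv_sorted_rev_perm _ _ hrunsperm).symm

-- ===== VERDICT (by name: the statement is the Claim_ definition above) =====
theorem classify_support_spec : Claim_equal_classify_support := by
  intro el _
  exact classify_support_eq_alt el
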